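-- pv_equiv track=rewrite | github.com/Omnicode786/Cis-2024-Muzammil | DSATsks/lab5/actual/partE.py | retrievTridiagonal
-- ===== SOURCE A (Python) =====
-- def retrievTridiagonal(U, n):
--     B = [[0] * n for _ in range(n)]
--     for j in range(n):
--         B[j][j] = U[j] # main diagonal
--         if j < n - 1: # upper diagonal
--             B[j][j + 1] = U[n + j]
--         if j > 0: # lower diagonal
--             B[j][j - 1] = U[2 * n - 1 + (j - 1)]
--
--     return B
-- ===== SOURCE B (Python) =====
-- def retrievTridiagonal(U, n):
--     return [[U[i] if j == i
--              else U[n + i] if j == i + 1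
--              else U[2 * n - 2 + i] if j == i - 1
--              else 0
--              for j in range(n)]
--             for i in range(n)]
-- ===== Notes on version B (the rewrite author's own statement) =====
-- stated objective: alternative
-- what changed: A allocates a zero matrix and destructively writes only the three band cells row by row; B builds the matrix functionally with a nested comprehension that classifies every cell (i,j) by its band, with the lower-diagonal index rewritten as U[2n-2+i].
import Mathlib
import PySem

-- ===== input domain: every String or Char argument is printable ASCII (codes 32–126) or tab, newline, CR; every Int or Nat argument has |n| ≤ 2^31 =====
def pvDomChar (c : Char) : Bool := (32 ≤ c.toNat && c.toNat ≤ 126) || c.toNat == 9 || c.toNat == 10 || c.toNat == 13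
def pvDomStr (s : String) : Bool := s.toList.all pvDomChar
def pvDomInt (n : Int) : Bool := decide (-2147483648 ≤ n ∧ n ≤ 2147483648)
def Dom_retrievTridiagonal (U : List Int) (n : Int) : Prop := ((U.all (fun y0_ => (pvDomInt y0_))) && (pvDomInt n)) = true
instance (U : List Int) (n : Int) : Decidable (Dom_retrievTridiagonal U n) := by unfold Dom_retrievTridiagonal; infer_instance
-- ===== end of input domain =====

-- B rebuilds the matrix by classifying every cell (i,j) by band in a nested comprehension
-- instead of A's in-place band-writing loop; objective: alternative (same exact values, O(n^2) either way).

-- U[i] for the indices the programs use; inside Pre_ every such index is in range,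
-- so the `.getD 0` branch is never taken and the port is exact there.
def pyGetZ (U : List Int) (i : Int) : Int := (PySem.List.pyGet? U i).getD 0

-- ===== PORT A =====
-- one iteration of A's loop body (the indices j, j+1, j-1 are nonnegative where the
-- branches fire, so `.toNat` matches Python's nonnegative list indexing exactly)
def stepA (U : List Int) (n : Int) (B : List (List Int)) (j : Int) : List (List Int) :=
  let B1 := B.modify j.toNat (fun row => row.set j.toNat (pyGetZ U j))
  let B2 := if j < n - 1 then
      B1.modify j.toNat (fun row => row.set (j + 1).toNat (pyGetZ U (n + j)))
    else B1
  if 0 < j then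
    B2.modify j.toNat (fun row => row.set (j - 1).toNat (pyGetZ U (2 * n - 1 + (j - 1))))
  else B2

def retrievTridiagonal (U : List Int) (n : Int) : List (List Int) :=
  let B := (PySem.List.pyRange 0 n 1).map (fun _ => List.replicate n.toNat 0)
  (PySem.List.pyRange 0 n 1).foldl (stepA U n) B

-- ===== PORT B =====
def retrievTridiagonal_alt (U : List Int) (n : Int) : List (List Int) :=
  (PySem.List.pyRange 0 n 1).map (fun i =>
    (PySem.List.pyRange 0 n 1).map (fun j =>
      if j = i then pyGetZ U i
      else if j = i + 1 then pyGetZ U (n + i)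
      else if j = i - 1 then pyGetZ U (2 * n - 2 + i)
      else 0))

-- ===== PRECONDITION & SPEC =====
-- Pre_ excludes exactly the inputs where Python A raises IndexError: n > 0 with U shorter
-- than the 3n-2 entries the three bands read.
def Pre_retrievTridiagonal (U : List Int) (n : Int) : Prop :=
  n ≤ 0 ∨ 3 * n - 2 ≤ (U.length : Int)
instance (U : List Int) (n : Int) : Decidable (Pre_retrievTridiagonal U n) := by
  unfold Pre_retrievTridiagonal; infer_instance

def pvWitness_retrievTridiagonal : List Int × Int := ([5, 7, 1, 2, 3, 4, 9], 3)

def Spec_retrievTridiagonal (U : List Int) (n : Int) (out : List (List Int)) : Prop := out = retrievTridiagonal_alt U n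
instance (U : List Int) (n : Int) (out : List (List Int)) : Decidable (Spec_retrievTridiagonal U n out) := by unfold Spec_retrievTridiagonal; infer_instance

-- ===== CLAIM (what is proved, stated in full; the proofs are below) =====
def Claim_equal_retrievTridiagonal : Prop := ∀ (U : List Int) (n : Int), Dom_retrievTridiagonal U n → Pre_retrievTridiagonal U n → Spec_retrievTridiagonal U n (retrievTridiagonal U n)

-- ===== LEMMAS AND PROOFS =====

-- the finished row k of A's matrix (all three band writes applied to a zero row)
def rowA (U : List Int) (n : Int) (m k : Nat) : List Int :=
  let r := (List.replicate m (0 : Int)).set k (pyGetZ U k)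
  let r := if (k : Int) < n - 1 then r.set (k + 1) (pyGetZ U (n + k)) else r
  if 0 < (k : Int) then r.set (k - 1) (pyGetZ U (2 * n - 1 + ((k : Int) - 1))) else r

-- A's matrix after the first k loop iterations: rows below k finished, the rest still zero
def partialB (U : List Int) (n : Int) (m k : Nat) : List (List Int) :=
  (List.range m).map (fun i => if i < k then rowA U n m i else List.replicate m (0 : Int))

lemma modify_map_range {a : Type} (m k : Nat) (f : Nat → a) (g : a → a) (hk : k < m) :
    ((List.range m).map f).modify k g
      = (List.range m).map (fun i => if i = k then g (f k) else f i) := by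
  apply List.ext_getElem
  · simp
  · intro i h1 h2
    simp only [List.getElem_modify, List.getElem_map, List.getElem_range]
    split_ifs <;> first | rfl | omega | (subst_vars; rfl)

-- iteration k only touches row k, turning it from the zero row into the finished row
lemma stepA_partialB (U : List Int) (n : Int) (m k : Nat) (hn : n = (m : Int)) (hk : k < m) :
    stepA U n (partialB U n m k) (k : Int) = partialB U n m (k + 1) := by
  have htn : ((k : Int)).toNat = k := by omega
  have htn1 : (((k : Int)) + 1).toNat = k + 1 := by omega
  have htn2 : (((k : Int)) - 1).toNat = k - 1 := by omega
  simp only [stepA, partialB, htn, htn1, htn2]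
  split_ifs with c1 c2 c3 <;>
  · repeat rw [modify_map_range m k _ _ hk]
    apply List.map_congr_left
    intro i hi
    rw [List.mem_range] at hi
    simp only [rowA]
    split_ifs <;> first | rfl | omega | (subst_vars; rfl)

lemma pyRange_cast (m : Nat) :
    PySem.List.pyRange 0 (m : Int) 1 = (List.range m).map (fun j : Nat => (j : Int)) := by
  rw [PySem.List.pyRange_one]
  simp only [Int.sub_zero, Int.toNat_natCast]
  exact List.map_congr_left (fun a _ => by simp)

lemma fold_partialB (U : List Int) (n : Int) (m : Nat) (hn : n = (m : Int)) :
    ∀ (c k : Nat), k + c ≤ m →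
    ((List.range' k c).map (fun j : Nat => (j : Int))).foldl (stepA U n) (partialB U n m k)
      = partialB U n m (k + c) := by
  intro c
  induction c with
  | zero => intro k _; simp
  | succ c ih =>
    intro k hkc
    rw [List.range'_succ]
    simp only [List.map_cons, List.foldl_cons]
    rw [stepA_partialB U n m k hn (by omega), ih (k + 1) (by omega)]
    congr 1; omega

-- a finished row of A equals the corresponding comprehension row of B
lemma rowA_eq_alt_row (U : List Int) (m i : Nat) (hi : i < m) :
    rowA U (m : Int) m i = ((List.range m).map (fun j : Nat => (j : Int))).map (fun j =>
      if j = (i : Int) then pyGetZ U i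
      else if j = (i : Int) + 1 then pyGetZ U ((m : Int) + i)
      else if j = (i : Int) - 1 then pyGetZ U (2 * (m : Int) - 2 + i)
      else 0) := by
  have hval : pyGetZ U (2 * (m : Int) - 1 + ((i : Int) - 1)) = pyGetZ U (2 * (m : Int) - 2 + i) := by
    congr 1; ring
  rw [List.map_map]
  apply List.ext_getElem
  · simp only [List.length_map, List.length_range, rowA]
    split_ifs <;> simp
  · intro j h1 h2
    simp only [List.length_map, List.length_range] at h2
    simp only [List.getElem_map, List.getElem_range, Function.comp]
    simp only [rowA, hval]
    split_ifs <;> first | rfl | omega |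
      (simp only [List.getElem_set, List.getElem_replicate]; split_ifs <;> first | rfl | omega)

-- ===== VERDICT (by name: the statement is the Claim_ definition above) =====
theorem retrievTridiagonal_spec : Claim_equal_retrievTridiagonal := by
  intro U n _ _
  unfold Spec_retrievTridiagonal retrievTridiagonal retrievTridiagonal_alt
  by_cases hn : n ≤ 0
  · rw [PySem.List.pyRange_one_eq_nil (by omega)]
    simp
  · obtain ⟨m, rfl⟩ : ∃ m : Nat, n = (m : Int) := ⟨n.toNat, by omega⟩
    rw [pyRange_cast]
    have h0 : (((List.range m).map (fun j : Nat => (j : Int))).map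
        (fun _ => List.replicate (((m : Int)).toNat) (0 : Int))) = partialB U (m : Int) m 0 := by
      rw [List.map_map]
      unfold partialB
      exact List.map_congr_left (fun a _ => by simp)
    rw [h0, List.range_eq_range',
      fold_partialB U (m : Int) m rfl m 0 (by omega)]
    simp only [Nat.zero_add]
    rw [← List.range_eq_range']
    unfold partialB
    rw [List.map_map]
    apply List.map_congr_left
    intro i hi
    rw [List.mem_range] at hi
    rw [if_pos hi]
    exact rowA_eq_alt_row U m i hi
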